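-- pv_equiv track=rewrite | github.com/tuanna199/PGC | src/pgc/blastFiltRecord.py | oneceList_length
-- ===== SOURCE A (Python) =====
-- def oneceList_length(OnceList):
--     UniqRegions = []
--     Lengths = 0
--     ListLen = len(OnceList)
--     if ListLen == 2:
--         UniqRegions = OnceList
--         Lengths += UniqRegions[1] - UniqRegions[0]
--     else:
--         for i in range(0, int(ListLen/2)):
--             start = OnceList[i*2]
--             end = OnceList[i*2+1]
--             UniqRegions.append([start, end])
--             length = end - start
--             Lengths += length
--     return Lengths
-- ===== SOURCE B (Python) =====
-- def oneceList_length(OnceList):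
--     n = len(OnceList) // 2
--     return sum(OnceList[1:2*n:2]) - sum(OnceList[0:2*n:2])
-- ===== Notes on version B (the rewrite author's own statement) =====
-- stated objective: simpler
-- what changed: Replaces the pairwise index loop (and its dead UniqRegions list and redundant len==2 branch) by a closed formula: total of the end-coordinate stride slice minus total of the start-coordinate stride slice, both truncated to 2*(len//2).
import Mathlib
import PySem

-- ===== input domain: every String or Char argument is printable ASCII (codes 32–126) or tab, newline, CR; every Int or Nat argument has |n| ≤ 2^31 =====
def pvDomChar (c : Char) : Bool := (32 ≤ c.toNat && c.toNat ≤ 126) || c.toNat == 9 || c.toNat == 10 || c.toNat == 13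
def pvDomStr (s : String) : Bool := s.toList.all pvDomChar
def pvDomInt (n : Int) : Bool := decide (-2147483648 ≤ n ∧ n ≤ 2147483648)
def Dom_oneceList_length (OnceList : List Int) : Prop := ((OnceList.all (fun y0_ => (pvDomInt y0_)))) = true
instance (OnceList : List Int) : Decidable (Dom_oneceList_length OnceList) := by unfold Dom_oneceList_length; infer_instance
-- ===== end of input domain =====

-- B replaces A's pairwise index loop by a closed formula: sum of the odd-index stride
-- slice minus sum of the even-index stride slice, both truncated to 2*(len//2); objective: simpler.

-- ===== PORT A =====
-- Port of A: index loop over range(0, int(len/2)); int(ListLen/2) equals Int division by 2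
-- since the length is nonnegative. Indices i*2, i*2+1 are always in range, so pyGetD is exact.
def oneceList_length (OnceList : List Int) : Int :=
  if OnceList.length = 2 then
    0 + (PySem.List.pyGetD OnceList 1 0 - PySem.List.pyGetD OnceList 0 0)
  else
    (PySem.List.pyRange 0 ((OnceList.length : Int) / 2) 1).foldl
      (fun Lengths i =>
        let start := PySem.List.pyGetD OnceList (i * 2) 0
        let stop := PySem.List.pyGetD OnceList (i * 2 + 1) 0
        Lengths + (stop - start)) 0

-- ===== PORT B =====
-- sum(OnceList[1:2*n:2]) - sum(OnceList[0:2*n:2]); slice? is exact for extended slices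
-- (step = 2 ≠ 0, so it always returns some; getD [] never fires its default).
def oneceList_length_alt (OnceList : List Int) : Int :=
  let n : Int := (OnceList.length : Int) / 2
  ((PySem.List.slice? OnceList (some 1) (some (2 * n)) 2).getD []).sum
    - ((PySem.List.slice? OnceList (some 0) (some (2 * n)) 2).getD []).sum

-- ===== PRECONDITION & SPEC =====
def Spec_oneceList_length (OnceList : List Int) (out : Int) : Prop := out = oneceList_length_alt OnceList
instance (OnceList : List Int) (out : Int) : Decidable (Spec_oneceList_length OnceList out) := by unfold Spec_oneceList_length; infer_instance

-- ===== CLAIM (what is proved, stated in full; the proofs are below) =====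
def Claim_equal_oneceList_length : Prop := ∀ (OnceList : List Int), Dom_oneceList_length OnceList → Spec_oneceList_length OnceList (oneceList_length OnceList)

-- ===== LEMMAS AND PROOFS =====

-- The stride slice xs[c : 2*(len//2) : 2] (c = 0 or 1) is the list of xs.getD (2k+c).
theorem pvSliceStride (xs : List Int) (c : Nat) (hc : c ≤ 1) :
    PySem.List.slice? xs (some (c : Int)) (some (2 * ((xs.length : Int) / 2))) 2
      = some ((List.range (xs.length / 2)).map (fun k => xs.getD (2 * k + c) 0)) := by
  simp only [PySem.List.slice?, PySem.List.sliceIndices]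
  have hcn : ¬ ((c:Int) < 0) := by omega
  have hnn : ¬ (2 * ((xs.length : Int) / 2) < 0) := by omega
  have hmin2 : min (2 * ((xs.length : Int) / 2)) (xs.length : Int) = 2 * ((xs.length : Int) / 2) := by omega
  simp only [show ¬((2:Int) = 0) from by norm_num, show ¬((2:Int) < 0) from by norm_num,
    show (0:Int) < 2 from by norm_num, hcn, hnn, hmin2, if_false, if_true]
  by_cases hL : xs.length ≤ 1
  · have hn : (xs.length : Int) / 2 = 0 := by omega
    have hr : xs.length / 2 = 0 := by omega
    simp [hn, hr]
    intro a ha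
    simp only [show ¬((c:Int) < 0 ∨ ((xs.length:Nat):Int) < 0) from by omega, if_false] at ha
    omega
  · have hmin : min (c : Int) (xs.length : Int) = (c : Int) := by omega
    have hcond : min (c:Int) (xs.length : Int) < 2 * ((xs.length : Int) / 2) := by omega
    have hcount : ((2 * ((xs.length : Int) / 2) - min (c:Int) (xs.length:Int) + 2 - 1) / 2).toNat
        = xs.length / 2 := by omega
    simp only [hcond, if_true, hcount, Option.some.injEq]
    rw [List.filterMap_congr (g := some ∘ fun k => xs.getD (2 * k + c) 0) ?_]
    · exact congrFun List.filterMap_eq_map _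
    · intro k hk
      simp only [List.mem_range] at hk
      have hidx : (min (c:Int) (xs.length:Int) + 2 * (k:Int)).toNat = 2 * k + c := by omega
      have hin : 2 * k + c < xs.length := by omega
      simp only [hidx, Function.comp_apply, List.getElem?_eq_getElem hin,
        List.getD_eq_getElem _ _ hin]

theorem pvSumSub (f g : Nat → Int) (n : Nat) :
    ((List.range n).map f).sum - ((List.range n).map g).sum
      = ((List.range n).map (fun k => f k - g k)).sum := by
  induction n with
  | zero => simp
  | succ m ih => simp [List.range_succ]; omega

-- A's loop summed over range(len//2) equals the difference of the two stride-slice sums.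
theorem pvA_loop (xs : List Int) :
    (PySem.List.pyRange 0 ((xs.length : Int) / 2) 1).foldl
      (fun Lengths i =>
        let start := PySem.List.pyGetD xs (i * 2) 0
        let stop := PySem.List.pyGetD xs (i * 2 + 1) 0
        Lengths + (stop - start)) 0
    = oneceList_length_alt xs := by
  have hs1 := pvSliceStride xs 1 (by omega)
  have hs0 := pvSliceStride xs 0 (by omega)
  simp only [Nat.cast_one, Nat.cast_zero] at hs1 hs0
  simp only [oneceList_length_alt, hs1, hs0, Option.getD_some]
  rw [pvSumSub]
  rw [PySem.List.pyRange_one]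
  have ht : (((xs.length : Int) / 2) - 0).toNat = xs.length / 2 := by omega
  rw [ht, List.foldl_map, PySem.List.foldl_add]
  simp only [zero_add]
  apply congrArg List.sum
  apply List.map_congr_left
  intro k _
  have h1 : (k : Int) * 2 = ((2 * k : Nat) : Int) := by push_cast; ring
  have h3 : ((2 * k : Nat) : Int) + 1 = ((2 * k + 1 : Nat) : Int) := by push_cast; ring
  simp only [h1, h3, PySem.List.pyGetD_natCast]
  simp

-- ===== VERDICT (by name: the statement is the Claim_ definition above) =====
theorem oneceList_length_spec : Claim_equal_oneceList_length := by
  intro xs _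
  unfold Spec_oneceList_length oneceList_length
  split
  · next h2 =>
    match xs, h2 with
    | [a, b], _ =>
      simp [oneceList_length_alt, PySem.List.pyGetD, PySem.List.slice?,
        PySem.List.sliceIndices, List.range_succ]
  · exact pvA_loop xs
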